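-- pv_equiv track=rewrite | github.com/MarceloMena0902/RafaelPabonAirlines | backend/ingestion/fill_reservations.py | _seat_list
-- ===== SOURCE A (Python) =====
-- import math
--
-- _AIRCRAFT = {
--     1: {
--         "type": "A380",
--         "first_seats": 10, "eco_seats": 439,
--         "first_groups": [["A","B"], ["C","D"]],
--         "eco_groups":   [["A","B","C"], ["D","E","F","G"], ["H","J","K"]],
--     },
--     2: {
--         "type": "B777",
--         "first_seats": 10, "eco_seats": 300,
--         "first_groups": [["A","B"], ["C","D"]],
--         "eco_groups":   [["A","B","C"], ["D","E","F"], ["G","H","J"]],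
--     },
--     3: {
--         "type": "A350",
--         "first_seats": 12, "eco_seats": 250,
--         "first_groups": [["A"], ["B","C"], ["D"]],
--         "eco_groups":   [["A","B","C"], ["D","E","F"], ["G","H","J"]],
--     },
--     4: {
--         "type": "B787",
--         "first_seats": 8, "eco_seats": 220,
--         "first_groups": [["A"], ["B","C"], ["D"]],
--         "eco_groups":   [["A","B","C"], ["D","E","F"], ["G","H","J"]],
--     },
-- }
--
-- def _ac_key(aircraft_id: int) -> int:
--     """Mapea el ID real del avión (1-50) a la clave del dict _AIRCRAFT (1-4)."""
--     if aircraft_id <= 6:    return 1   # A380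
--     elif aircraft_id <= 24: return 2   # B777
--     elif aircraft_id <= 35: return 3   # A350
--     else:                   return 4   # B787
--
-- def _seat_list(aircraft_id: int):
--     """Devuelve (first_seats[], eco_seats[]) con IDs reales de asiento."""
--     cfg = _AIRCRAFT[_ac_key(aircraft_id)]
--     first_per_row = sum(len(g) for g in cfg["first_groups"])
--     eco_per_row   = sum(len(g) for g in cfg["eco_groups"])
--     first_rows    = math.ceil(cfg["first_seats"] / first_per_row)
--     eco_rows      = math.ceil(cfg["eco_seats"]   / eco_per_row)
--
--     first = []
--     for row in range(1, first_rows + 1):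
--         for grp in cfg["first_groups"]:
--             for col in grp:
--                 first.append(f"{row}{col}")
--     first = first[: cfg["first_seats"]]
--
--     eco = []
--     for row in range(first_rows + 1, first_rows + eco_rows + 1):
--         for grp in cfg["eco_groups"]:
--             for col in grp:
--                 eco.append(f"{row}{col}")
--     eco = eco[: cfg["eco_seats"]]
--
--     return first, eco
-- ===== SOURCE B (Python) =====
-- import math
--
-- _AIRCRAFT = {
--     1: {
--         "type": "A380",
--         "first_seats": 10, "eco_seats": 439,
--         "first_groups": [["A","B"], ["C","D"]],
--         "eco_groups":   [["A","B","C"], ["D","E","F","G"], ["H","J","K"]],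
--     },
--     2: {
--         "type": "B777",
--         "first_seats": 10, "eco_seats": 300,
--         "first_groups": [["A","B"], ["C","D"]],
--         "eco_groups":   [["A","B","C"], ["D","E","F"], ["G","H","J"]],
--     },
--     3: {
--         "type": "A350",
--         "first_seats": 12, "eco_seats": 250,
--         "first_groups": [["A"], ["B","C"], ["D"]],
--         "eco_groups":   [["A","B","C"], ["D","E","F"], ["G","H","J"]],
--     },
--     4: {
--         "type": "B787",
--         "first_seats": 8, "eco_seats": 220,
--         "first_groups": [["A"], ["B","C"], ["D"]],
--         "eco_groups":   [["A","B","C"], ["D","E","F"], ["G","H","J"]],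
--     },
-- }
--
-- def _ac_key(aircraft_id: int) -> int:
--     if aircraft_id <= 6:    return 1
--     elif aircraft_id <= 24: return 2
--     elif aircraft_id <= 35: return 3
--     else:                   return 4
--
-- def _seat_list(aircraft_id: int):
--     """Devuelve (first_seats[], eco_seats[]) con IDs reales de asiento."""
--     cfg = _AIRCRAFT[_ac_key(aircraft_id)]
--     first_cols = [c for g in cfg["first_groups"] for c in g]
--     eco_cols   = [c for g in cfg["eco_groups"] for c in g]
--     fpr, epr = len(first_cols), len(eco_cols)
--     first_rows = -(-cfg["first_seats"] // fpr)   # ceil division, no float round trip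
--     first = [f"{1 + i // fpr}{first_cols[i % fpr]}" for i in range(cfg["first_seats"])]
--     eco   = [f"{first_rows + 1 + i // epr}{eco_cols[i % epr]}" for i in range(cfg["eco_seats"])]
--     return first, eco
-- ===== Notes on version B (the rewrite author's own statement) =====
-- stated objective: simpler
-- what changed: B flattens each cabin's column groups once and maps each linear seat index i directly to its seat ID via i//per_row and i%per_row, replacing A's nested row/group/column loops followed by truncating slices (and A's float ceil by integer ceil division).
import Mathlib
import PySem

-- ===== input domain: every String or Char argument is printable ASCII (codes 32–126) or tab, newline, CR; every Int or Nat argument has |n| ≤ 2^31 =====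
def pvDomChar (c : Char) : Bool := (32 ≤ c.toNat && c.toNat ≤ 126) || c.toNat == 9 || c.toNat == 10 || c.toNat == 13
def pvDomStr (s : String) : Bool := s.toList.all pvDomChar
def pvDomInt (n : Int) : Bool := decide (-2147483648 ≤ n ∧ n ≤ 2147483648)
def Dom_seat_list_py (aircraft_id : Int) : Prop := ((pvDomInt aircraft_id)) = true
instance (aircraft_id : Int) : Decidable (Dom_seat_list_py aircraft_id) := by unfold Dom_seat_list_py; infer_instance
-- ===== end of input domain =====

set_option maxRecDepth 10000


-- B replaces A's nested row/group/column loops + truncating slices by direct index arithmetic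
-- over flattened column lists (objective: simpler).

-- ===== PORT A =====
-- shared module context: the _AIRCRAFT config dict ("type" field is unused by _seat_list and omitted)
structure PvCfg where
  first_seats : Int
  eco_seats : Int
  first_groups : List (List String)
  eco_groups : List (List String)
deriving Repr, DecidableEq

def pvAIRCRAFT : List (Int × PvCfg) :=
  [ (1, ⟨10, 439, [["A","B"], ["C","D"]], [["A","B","C"], ["D","E","F","G"], ["H","J","K"]]⟩),
    (2, ⟨10, 300, [["A","B"], ["C","D"]], [["A","B","C"], ["D","E","F"], ["G","H","J"]]⟩),
    (3, ⟨12, 250, [["A"], ["B","C"], ["D"]], [["A","B","C"], ["D","E","F"], ["G","H","J"]]⟩),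
    (4, ⟨8, 220, [["A"], ["B","C"], ["D"]], [["A","B","C"], ["D","E","F"], ["G","H","J"]]⟩) ]

-- _ac_key (shared module helper)
def pvAcKey (aircraft_id : Int) : Int :=
  if aircraft_id ≤ 6 then 1
  else if aircraft_id ≤ 24 then 2
  else if aircraft_id ≤ 35 then 3
  else 4

-- _AIRCRAFT[key]; the key returned by _ac_key is always present, so getD never hits the default
def pvCfgOf (key : Int) : PvCfg :=
  (PySem.Dict.get? (PySem.Dict.ofList pvAIRCRAFT) key).getD ⟨0, 0, [], []⟩

-- math.ceil(a / b): ceiling division; exact here since these small operands are float-exact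
def pvCeilDiv (a b : Int) : Int := -(PySem.Int.floordiv (-a) b)

-- body of A after 'cfg = _AIRCRAFT[_ac_key(aircraft_id)]'
def pvSeatA (cfg : PvCfg) : List String × List String :=
  let first_per_row : Int := (cfg.first_groups.map (fun g => (g.length : Int))).sum
  let eco_per_row : Int := (cfg.eco_groups.map (fun g => (g.length : Int))).sum
  let first_rows := pvCeilDiv cfg.first_seats first_per_row
  let eco_rows := pvCeilDiv cfg.eco_seats eco_per_row
  let first := (PySem.List.pyRange 1 (first_rows + 1) 1).foldl (fun acc row =>
    cfg.first_groups.foldl (fun acc grp =>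
      grp.foldl (fun acc col => acc ++ [PySem.Int.toStr row ++ col]) acc) acc) []
  let first := PySem.List.slice first none (some cfg.first_seats)
  let eco := (PySem.List.pyRange (first_rows + 1) (first_rows + eco_rows + 1) 1).foldl (fun acc row =>
    cfg.eco_groups.foldl (fun acc grp =>
      grp.foldl (fun acc col => acc ++ [PySem.Int.toStr row ++ col]) acc) acc) []
  let eco := PySem.List.slice eco none (some cfg.eco_seats)
  (first, eco)

def seat_list_py (aircraft_id : Int) : List String × List String :=
  pvSeatA (pvCfgOf (pvAcKey aircraft_id))

-- ===== PORT B =====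
-- body of B after 'cfg = _AIRCRAFT[_ac_key(aircraft_id)]'
def pvSeatB (cfg : PvCfg) : List String × List String :=
  let first_cols := cfg.first_groups.flatMap id
  let eco_cols := cfg.eco_groups.flatMap id
  let fpr : Int := first_cols.length
  let epr : Int := eco_cols.length
  let first_rows := -(PySem.Int.floordiv (-cfg.first_seats) fpr)
  let first := (PySem.List.pyRange 0 cfg.first_seats 1).map (fun i =>
    PySem.Int.toStr (1 + PySem.Int.floordiv i fpr) ++ PySem.List.pyGetD first_cols (PySem.Int.mod i fpr) "")
  let eco := (PySem.List.pyRange 0 cfg.eco_seats 1).map (fun i =>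
    PySem.Int.toStr (first_rows + 1 + PySem.Int.floordiv i epr) ++ PySem.List.pyGetD eco_cols (PySem.Int.mod i epr) "")
  (first, eco)

def seat_list_py_alt (aircraft_id : Int) : List String × List String :=
  pvSeatB (pvCfgOf (pvAcKey aircraft_id))

-- ===== PRECONDITION & SPEC =====
def Spec_seat_list_py (aircraft_id : Int) (out : List String × List String) : Prop := out = seat_list_py_alt aircraft_id
instance (aircraft_id : Int) (out : List String × List String) : Decidable (Spec_seat_list_py aircraft_id out) := by unfold Spec_seat_list_py; infer_instance

-- ===== CLAIM (what is proved, stated in full; the proofs are below) =====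
def Claim_equal_seat_list_py : Prop := ∀ (aircraft_id : Int), Dom_seat_list_py aircraft_id → Spec_seat_list_py aircraft_id (seat_list_py aircraft_id)

-- ===== LEMMAS AND PROOFS =====
theorem pvAcKey_cases (a : Int) : pvAcKey a = 1 ∨ pvAcKey a = 2 ∨ pvAcKey a = 3 ∨ pvAcKey a = 4 := by
  unfold pvAcKey; split_ifs <;> simp

theorem pvSeat_eq_1 : pvSeatA (pvCfgOf 1) = pvSeatB (pvCfgOf 1) := by decide
theorem pvSeat_eq_2 : pvSeatA (pvCfgOf 2) = pvSeatB (pvCfgOf 2) := by decide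
theorem pvSeat_eq_3 : pvSeatA (pvCfgOf 3) = pvSeatB (pvCfgOf 3) := by decide
theorem pvSeat_eq_4 : pvSeatA (pvCfgOf 4) = pvSeatB (pvCfgOf 4) := by decide

-- ===== VERDICT (by name: the statement is the Claim_ definition above) =====
theorem seat_list_py_spec : Claim_equal_seat_list_py := by
  intro a _
  unfold Spec_seat_list_py seat_list_py seat_list_py_alt
  rcases pvAcKey_cases a with h|h|h|h <;> rw [h]
  · exact pvSeat_eq_1
  · exact pvSeat_eq_2
  · exact pvSeat_eq_3
  · exact pvSeat_eq_4
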